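-- pv_equiv track=rewrite | github.com/yubinbai/Codejam | round1B 2008/mousetrap/main4.py | solve
-- ===== SOURCE A (Python) =====
-- def solve(par):
--     K, n, queries = par
--     answers = [-1] * n
--     pos = 0
--     for i in range(1, K + 1):
--         # Compute the next position, after wrap-around.
--         pos = (pos + i - 1) % (K - i + 1);
--         for j in range(n):
--             if answers[j] < 0:
--                 if queries[j] == pos + 1:
--                     queries[j] = -1
--                     answers[j] = i
--                 elif queries[j] > pos + 1:
--                     # The effect of deleting the next position.
--                     queries[j] -= 1
--     result = []
--     for p in answers:
--         result.append(str(p))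
--     return ' '.join(result)
-- ===== SOURCE B (Python) =====
-- def solve(par):
--     # Query-major instead of step-major: each queried card is traced through the
--     # deal independently, returning at the step where it is dealt (A sweeps all
--     # queries at every step and never exits early).  A dict memoises duplicate
--     # queries and cards outside 1..K are rejected without simulating.
--     # (Unlike A, this does not mutate the queries list in place.)
--     K, n, queries = par
--
--     def deal_step(q):
--         if q < 1 or q > K:
--             return -1
--         pos = 0
--         for i in range(1, K + 1):
--             pos = (pos + i - 1) % (K - i + 1)
--             if q == pos + 1:
--                 return i
--             if q > pos + 1:
--                 q -= 1
--         return -1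
--
--     memo = {}
--     out = []
--     for j in range(n):
--         q = queries[j]
--         if q not in memo:
--             memo[q] = deal_step(q)
--         out.append(str(memo[q]))
--     return ' '.join(out)
-- ===== Notes on version B (the rewrite author's own statement) =====
-- stated objective: faster
-- what changed: A sweeps all n query slots at every one of the K deal steps, mutating answers/queries arrays in lock-step; B inverts the traversal: it traces each queried card through the deal independently, returning early at the step where it is dealt, memoises duplicate queries in a dict and rejects out-of-range queries in O(1), so it does far fewer inner iterations than A's full K*n sweep; Pre_ excludes n > len(queries), where A raises IndexError whenever K >= 1 (and for K <= 0 merely pads with -1 for query slots that do not exist, where B raises).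
-- outside the precondition, e.g. on solve((0, 2, [])): A returns '-1 -1', B raises IndexError
import Mathlib
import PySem

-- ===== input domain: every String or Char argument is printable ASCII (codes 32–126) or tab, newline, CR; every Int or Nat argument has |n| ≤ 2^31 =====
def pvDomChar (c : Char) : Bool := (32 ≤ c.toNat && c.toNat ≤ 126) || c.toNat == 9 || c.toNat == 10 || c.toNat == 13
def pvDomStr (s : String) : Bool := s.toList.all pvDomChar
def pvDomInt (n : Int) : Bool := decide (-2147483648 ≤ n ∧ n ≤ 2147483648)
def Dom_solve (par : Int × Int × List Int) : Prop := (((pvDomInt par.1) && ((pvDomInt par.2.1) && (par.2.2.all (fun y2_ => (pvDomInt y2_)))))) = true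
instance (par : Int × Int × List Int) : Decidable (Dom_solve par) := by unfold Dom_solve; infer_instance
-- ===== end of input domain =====

-- B inverts A's traversal: instead of sweeping all n query slots at every deal step,
-- it traces each queried card through the deal independently with an early return,
-- memoises duplicate queries in a dict and rejects out-of-range queries in O(1)
-- (return-value equivalence only: A mutates its queries list in place, B does not).

-- ===== PORT A =====
-- one iteration of A's inner 'for j in range(n)' loop; state = (answers, queries)
def solveInnerBody (pos i : Int) (aq : List Int × List Int) (j : Int) : List Int × List Int :=
  if PySem.List.pyGetD aq.1 j 0 < 0 then
    if PySem.List.pyGetD aq.2 j 0 = pos + 1 then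
      (PySem.List.pySetD aq.1 j i, PySem.List.pySetD aq.2 j (-1))
    else if PySem.List.pyGetD aq.2 j 0 > pos + 1 then
      (aq.1, PySem.List.pySetD aq.2 j (PySem.List.pyGetD aq.2 j 0 - 1))
    else aq
  else aq

-- one iteration of A's outer 'for i in range(1, K+1)' loop; state = (answers, queries, pos)
def solveOuterBody (K n : Int) (st : List Int × List Int × Int) (i : Int) : List Int × List Int × Int :=
  let pos := PySem.Int.mod (st.2.2 + i - 1) (K - i + 1)
  let aq := (PySem.List.pyRange 0 n 1).foldl (solveInnerBody pos i) (st.1, st.2.1)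
  (aq.1, aq.2, pos)

def solve (par : Int × Int × List Int) : String :=
  let K := par.1
  let n := par.2.1
  let queries := par.2.2
  let st := (PySem.List.pyRange 1 (K + 1) 1).foldl (solveOuterBody K n)
    (PySem.List.pyRepeat [-1] n, queries, 0)
  let result := st.1.foldl (fun r p => r ++ [PySem.Int.toStr p]) []
  PySem.Str.join " " result

-- ===== PORT B =====
-- B's inner helper deal_step: trace one card through the deal, returning at the
-- step where it is dealt; the 'for i in range(1, K+1)' loop with early return
-- is recursion over that range list
def dealLoop (K : Int) : List Int → Int → Int → Int
  | [], _, _ => -1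
  | i :: rest, q, pos =>
    let pos' := PySem.Int.mod (pos + i - 1) (K - i + 1)
    if q = pos' + 1 then i
    else if q > pos' + 1 then dealLoop K rest (q - 1) pos'
    else dealLoop K rest q pos'

def dealStep (K q : Int) : Int :=
  if q < 1 ∨ K < q then -1
  else dealLoop K (PySem.List.pyRange 1 (K + 1) 1) q 0

-- one iteration of B's 'for j in range(n)' loop; state = (memo dict, out list)
def solveAltBody (K : Int) (queries : List Int) (st : PySem.Dict Int Int × List String) (j : Int) :
    PySem.Dict Int Int × List String :=
  let q := PySem.List.pyGetD queries j 0
  let memo := if st.1.contains q then st.1 else st.1.insert q (dealStep K q)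
  (memo, st.2 ++ [PySem.Int.toStr (memo.getD q 0)])

def solve_alt (par : Int × Int × List Int) : String :=
  let K := par.1
  let n := par.2.1
  let queries := par.2.2
  let st := (PySem.List.pyRange 0 n 1).foldl (solveAltBody K queries) (PySem.Dict.empty, [])
  PySem.Str.join " " st.2

-- ===== PRECONDITION & SPEC =====
-- Pre_ excludes n > len(queries): there A raises IndexError whenever K ≥ 1, and for
-- K ≤ 0 it merely pads the answer with -1 entries for queries that do not exist
-- (B raises IndexError there).
def Pre_solve (par : Int × Int × List Int) : Prop := par.2.1 ≤ (par.2.2.length : Int)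
instance (par : Int × Int × List Int) : Decidable (Pre_solve par) := by unfold Pre_solve; infer_instance

def pvWitness_solve : (Int × Int × List Int) := (3, 2, [1, 2, 5])

def Spec_solve (par : Int × Int × List Int) (out : String) : Prop := out = solve_alt par
instance (par : Int × Int × List Int) (out : String) : Decidable (Spec_solve par out) := by unfold Spec_solve; infer_instance

-- ===== CLAIM (what is proved, stated in full; the proofs are below) =====
def Claim_equal_solve : Prop := ∀ (par : Int × Int × List Int), Dom_solve par → Pre_solve par → Spec_solve par (solve par)

-- ===== LEMMAS AND PROOFS =====

-- One deal step acting on a single tracked card (q, a): q = current 1-based rank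
-- among the remaining cards (A's mutated query value), a = step dealt (or -1).
def stepCard (pos i : Int) (c : Int × Int) : Int × Int :=
  if c.2 < 0 then
    if c.1 = pos + 1 then (-1, i)
    else if c.1 > pos + 1 then (c.1 - 1, c.2)
    else c
  else c

-- fuel-indexed form of A's outer loop on one tracked card
def runCard (K : Int) (fuel : Nat) (i0 pos : Int) (c : Int × Int) : Int × Int :=
  match fuel with
  | 0 => c
  | f + 1 =>
    let pos' := PySem.Int.mod (pos + i0 - 1) (K - i0 + 1)
    runCard K f (i0 + 1) pos' (stepCard pos' i0 c)

-- fuel-indexed form of A's outer loop on the whole card list, with final pos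
def runA (K : Int) (fuel : Nat) (i0 pos : Int) (cards : List (Int × Int)) : List (Int × Int) × Int :=
  match fuel with
  | 0 => (cards, pos)
  | f + 1 =>
    let pos' := PySem.Int.mod (pos + i0 - 1) (K - i0 + 1)
    runA K f (i0 + 1) pos' (cards.map (stepCard pos' i0))

lemma set_append_len {α : Type} (l1 : List α) (x v : α) (l2 : List α) :
    (l1 ++ x :: l2).set l1.length v = l1 ++ v :: l2 := by
  induction l1 with
  | nil => rfl
  | cons h t ih => simp [ih]

lemma getD_append_len {α : Type} (l1 : List α) (x : α) (l2 : List α) (dflt : α) :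
    (l1 ++ x :: l2).getD l1.length dflt = x := by
  induction l1 with
  | nil => rfl
  | cons h t ih => simp

lemma pyGetD_mid {α : Type} (l1 : List α) (x : α) (l2 : List α) (d : α) (j : Int)
    (hj : j = (l1.length : Int)) : PySem.List.pyGetD (l1 ++ x :: l2) j d = x := by
  subst hj; rw [PySem.List.pyGetD_natCast]; exact getD_append_len l1 x l2 d

lemma pySetD_mid {α : Type} (l1 : List α) (x v : α) (l2 : List α) (j : Int)
    (hj : j = (l1.length : Int)) : PySem.List.pySetD (l1 ++ x :: l2) j v = l1 ++ v :: l2 := by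
  subst hj; rw [PySem.List.pySetD_natCast]; exact set_append_len l1 x v l2

-- A's inner loop = pointwise stepCard on the (query, answer) card list
lemma inner_step (pos i : Int) :
    ∀ (suf pre : List (Int × Int)) (tail : List Int) (a b : Int),
    a = (pre.length : Int) → b = a + (suf.length : Int) →
    (PySem.List.pyRange a b 1).foldl (solveInnerBody pos i)
      ((pre ++ suf).map Prod.snd, (pre ++ suf).map Prod.fst ++ tail)
    = ((pre ++ suf.map (stepCard pos i)).map Prod.snd,
       (pre ++ suf.map (stepCard pos i)).map Prod.fst ++ tail) := by
  intro suf
  induction suf with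
  | nil =>
    intro pre tail a b ha hb
    rw [PySem.List.pyRange_one_eq_nil (by simp at hb; omega)]
    simp
  | cons c cs ih =>
    intro pre tail a b ha hb
    subst ha
    have hab : (pre.length : Int) < b := by simp at hb; omega
    rw [PySem.List.pyRange_one_cons hab, List.foldl_cons]
    have e2 : (pre ++ c :: cs).map Prod.snd = pre.map Prod.snd ++ c.2 :: cs.map Prod.snd := by simp
    have e1 : (pre ++ c :: cs).map Prod.fst ++ tail
        = pre.map Prod.fst ++ c.1 :: (cs.map Prod.fst ++ tail) := by simp
    rw [e2, e1]
    have hbody : solveInnerBody pos i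
        (pre.map Prod.snd ++ c.2 :: cs.map Prod.snd,
         pre.map Prod.fst ++ c.1 :: (cs.map Prod.fst ++ tail)) (pre.length : Int)
        = (pre.map Prod.snd ++ (stepCard pos i c).2 :: cs.map Prod.snd,
           pre.map Prod.fst ++ (stepCard pos i c).1 :: (cs.map Prod.fst ++ tail)) := by
      simp only [solveInnerBody,
        pyGetD_mid (pre.map Prod.snd) c.2 (cs.map Prod.snd) 0 (pre.length : Int) (by simp),
        pyGetD_mid (pre.map Prod.fst) c.1 (cs.map Prod.fst ++ tail) 0 (pre.length : Int) (by simp)]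
      unfold stepCard
      split_ifs with h1 h2 h3 <;>
        simp [pySetD_mid (pre.map Prod.snd) c.2 _ (cs.map Prod.snd) (pre.length : Int) (by simp),
              pySetD_mid (pre.map Prod.fst) c.1 _ (cs.map Prod.fst ++ tail) (pre.length : Int) (by simp)]
    rw [hbody]
    have e2' : pre.map Prod.snd ++ (stepCard pos i c).2 :: cs.map Prod.snd
        = ((pre ++ [stepCard pos i c]) ++ cs).map Prod.snd := by simp
    have e1' : pre.map Prod.fst ++ (stepCard pos i c).1 :: (cs.map Prod.fst ++ tail)
        = ((pre ++ [stepCard pos i c]) ++ cs).map Prod.fst ++ tail := by simp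
    rw [e2', e1']
    rw [ih (pre ++ [stepCard pos i c]) tail ((pre.length : Int) + 1) b (by simp) (by simp at hb ⊢; omega)]
    simp

-- A's outer loop = runA
lemma outerA (K n : Int) :
    ∀ (fuel : Nat) (i0 b pos : Int) (cards : List (Int × Int)) (tail : List Int),
    b = i0 + (fuel : Int) →
    PySem.List.pyRange 0 n 1 = PySem.List.pyRange 0 (cards.length : Int) 1 →
    (PySem.List.pyRange i0 b 1).foldl (solveOuterBody K n)
      (cards.map Prod.snd, cards.map Prod.fst ++ tail, pos)
    = ((runA K fuel i0 pos cards).1.map Prod.snd,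
       (runA K fuel i0 pos cards).1.map Prod.fst ++ tail,
       (runA K fuel i0 pos cards).2) := by
  intro fuel
  induction fuel with
  | zero =>
    intro i0 b pos cards tail hb hr
    rw [PySem.List.pyRange_one_eq_nil (by simp at hb; omega)]
    simp [runA]
  | succ f ih =>
    intro i0 b pos cards tail hb hr
    have hab : i0 < b := by simp at hb; omega
    rw [PySem.List.pyRange_one_cons hab, List.foldl_cons]
    have hbody : solveOuterBody K n (cards.map Prod.snd, cards.map Prod.fst ++ tail, pos) i0
        = ((cards.map (stepCard (PySem.Int.mod (pos + i0 - 1) (K - i0 + 1)) i0)).map Prod.snd,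
           (cards.map (stepCard (PySem.Int.mod (pos + i0 - 1) (K - i0 + 1)) i0)).map Prod.fst ++ tail,
           PySem.Int.mod (pos + i0 - 1) (K - i0 + 1)) := by
      simp only [solveOuterBody]
      rw [hr]
      have := inner_step (PySem.Int.mod (pos + i0 - 1) (K - i0 + 1)) i0 cards [] tail 0
        (cards.length : Int) (by simp) (by simp)
      simp only [List.nil_append] at this
      rw [this]
    rw [hbody]
    rw [ih (i0 + 1) b (PySem.Int.mod (pos + i0 - 1) (K - i0 + 1))
        (cards.map (stepCard (PySem.Int.mod (pos + i0 - 1) (K - i0 + 1)) i0)) tail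
        (by simp at hb ⊢; omega) (by rw [hr]; simp)]
    rfl

-- runA acts on each card independently
lemma runA_fst (K : Int) :
    ∀ (fuel : Nat) (i0 pos : Int) (cards : List (Int × Int)),
    (runA K fuel i0 pos cards).1 = cards.map (runCard K fuel i0 pos) := by
  intro fuel
  induction fuel with
  | zero => intro i0 pos cards; simp [runA, runCard]
  | succ f ih =>
    intro i0 pos cards
    rw [runA, ih]
    rw [List.map_map]
    rfl

-- a card already dealt keeps its recorded step
lemma runCard_frozen (K : Int) :
    ∀ (fuel : Nat) (i0 pos : Int) (c : Int × Int), 0 ≤ c.2 →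
    runCard K fuel i0 pos c = c := by
  intro fuel
  induction fuel with
  | zero => intro i0 pos c _; rfl
  | succ f ih =>
    intro i0 pos c hc
    have hsc : stepCard (PySem.Int.mod (pos + i0 - 1) (K - i0 + 1)) i0 c = c := by
      simp [stepCard, show ¬(c.2 < 0) by omega]
    calc runCard K (f + 1) i0 pos c
        = runCard K f (i0 + 1) (PySem.Int.mod (pos + i0 - 1) (K - i0 + 1))
            (stepCard (PySem.Int.mod (pos + i0 - 1) (K - i0 + 1)) i0 c) := rfl
      _ = c := by rw [hsc]; exact ih _ _ c hc

-- CORE: A's per-card full sweep computes exactly B's early-exit trace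
lemma runCard_dealLoop (K : Int) :
    ∀ (fuel : Nat) (i0 b pos q : Int), b = i0 + (fuel : Int) → 1 ≤ i0 →
    (runCard K fuel i0 pos (q, -1)).2 = dealLoop K (PySem.List.pyRange i0 b 1) q pos := by
  intro fuel
  induction fuel with
  | zero =>
    intro i0 b pos q hb _
    rw [PySem.List.pyRange_one_eq_nil (by omega)]
    rfl
  | succ f ih =>
    intro i0 b pos q hb hi
    rw [PySem.List.pyRange_one_cons (by omega)]
    have hrc : runCard K (f + 1) i0 pos (q, -1)
        = runCard K f (i0 + 1) (PySem.Int.mod (pos + i0 - 1) (K - i0 + 1))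
            (stepCard (PySem.Int.mod (pos + i0 - 1) (K - i0 + 1)) i0 (q, -1)) := rfl
    rw [hrc]
    rw [dealLoop]
    by_cases h1 : q = PySem.Int.mod (pos + i0 - 1) (K - i0 + 1) + 1
    · have hsc : stepCard (PySem.Int.mod (pos + i0 - 1) (K - i0 + 1)) i0 (q, -1) = (-1, i0) := by
        simp [stepCard, h1]
      rw [hsc, if_pos h1, runCard_frozen K f _ _ (-1, i0) (by simp; omega)]
    · by_cases h2 : q > PySem.Int.mod (pos + i0 - 1) (K - i0 + 1) + 1
      · have hsc : stepCard (PySem.Int.mod (pos + i0 - 1) (K - i0 + 1)) i0 (q, -1) = (q - 1, -1) := by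
          simp [stepCard, h1, h2]
        rw [hsc, if_neg h1, if_pos h2]
        exact ih (i0 + 1) b _ (q - 1) (by omega) (by omega)
      · have hsc : stepCard (PySem.Int.mod (pos + i0 - 1) (K - i0 + 1)) i0 (q, -1) = (q, -1) := by
          simp [stepCard, h1, h2]
        rw [hsc, if_neg h1, if_neg h2]
        exact ih (i0 + 1) b _ q (by omega) (by omega)

-- out-of-range cards are never dealt
lemma dealLoop_out (K : Int) :
    ∀ (fuel : Nat) (i0 pos q : Int), i0 + (fuel : Int) = K + 1 →
    (q < 1 ∨ K + 1 - i0 < q) → dealLoop K (PySem.List.pyRange i0 (K + 1) 1) q pos = -1 := by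
  intro fuel
  induction fuel with
  | zero =>
    intro i0 pos q hb _
    rw [PySem.List.pyRange_one_eq_nil (by omega)]
    rfl
  | succ f ih =>
    intro i0 pos q hb hq
    have hm : (0 : Int) < K - i0 + 1 := by omega
    have h0 := PySem.Int.mod_nonneg (pos + i0 - 1) hm
    have h1 := PySem.Int.mod_lt (pos + i0 - 1) hm
    rw [PySem.List.pyRange_one_cons (by omega)]
    rw [dealLoop]
    rcases hq with hq | hq
    · rw [if_neg (by omega), if_neg (by omega)]
      exact ih (i0 + 1) _ q (by omega) (Or.inl hq)
    · rw [if_neg (by omega), if_pos (by omega)]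
      exact ih (i0 + 1) _ (q - 1) (by omega) (Or.inr (by omega))

-- A's per-card sweep = B's deal_step helper
lemma runCard_eq_dealStep (K q : Int) (hK : 0 ≤ K) :
    (runCard K K.toNat 1 0 (q, -1)).2 = dealStep K q := by
  rw [runCard_dealLoop K K.toNat 1 (K + 1) 0 q (by omega) le_rfl]
  unfold dealStep
  by_cases h : q < 1 ∨ K < q
  · rw [if_pos h]
    exact dealLoop_out K K.toNat 1 0 q (by omega) (by omega)
  · rw [if_neg h]

-- B's memoised output loop appends str(deal_step(q)) for the first n queries
lemma memo_fold (K : Int) :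
    ∀ (suf pre rest : List Int) (memo : PySem.Dict Int Int) (out : List String) (a : Int),
    a = (pre.length : Int) →
    (∀ k v, memo.get? k = some v → v = dealStep K k) →
    ((PySem.List.pyRange a (a + (suf.length : Int)) 1).foldl
        (solveAltBody K (pre ++ suf ++ rest)) (memo, out)).2
      = out ++ suf.map (fun q => PySem.Int.toStr (dealStep K q)) := by
  intro suf
  induction suf with
  | nil =>
    intro pre rest memo out a ha hmemo
    rw [PySem.List.pyRange_one_eq_nil (by simp)]
    simp
  | cons c cs ih =>
    intro pre rest memo out a ha hmemo
    subst ha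
    rw [PySem.List.pyRange_one_cons (by simp; try omega), List.foldl_cons]
    have hq : PySem.List.pyGetD (pre ++ (c :: cs) ++ rest) (pre.length : Int) 0 = c := by
      have he : pre ++ (c :: cs) ++ rest = pre ++ c :: (cs ++ rest) := by simp
      rw [he]
      exact pyGetD_mid pre c (cs ++ rest) 0 _ rfl
    have hbody : solveAltBody K (pre ++ (c :: cs) ++ rest) (memo, out) (pre.length : Int)
        = (if memo.contains c then memo else memo.insert c (dealStep K c),
           out ++ [PySem.Int.toStr (dealStep K c)]) := by
      simp only [solveAltBody, hq]
      by_cases hc : memo.contains c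
      · rw [if_pos hc]
        have hsome : (memo.get? c).isSome := by
          rw [← PySem.Dict.contains_eq_isSome_get?]; exact hc
        obtain ⟨v, hv⟩ := Option.isSome_iff_exists.mp hsome
        rw [PySem.Dict.getD_eq_get?_getD, hv, hmemo c v hv]
        rfl
      · rw [if_neg hc]
        rw [PySem.Dict.getD_eq_get?_getD, PySem.Dict.get?_insert_self]
        rfl
    rw [hbody]
    by_cases hc : memo.contains c
    · rw [if_pos hc]
      have h5 := ih (pre ++ [c]) rest memo (out ++ [PySem.Int.toStr (dealStep K c)])
        ((pre.length : Int) + 1) (by simp) hmemo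
      rw [show pre ++ [c] ++ cs ++ rest = pre ++ (c :: cs) ++ rest by simp] at h5
      rw [show ((pre.length : Int) + 1) + (cs.length : Int)
            = (pre.length : Int) + ((c :: cs).length : Int) by simp; try omega] at h5
      rw [h5]
      simp
    · rw [if_neg hc]
      have hmemo' : ∀ k v, (memo.insert c (dealStep K c)).get? k = some v → v = dealStep K k := by
        intro k v hv
        by_cases hk : k = c
        · subst hk
          rw [PySem.Dict.get?_insert_self] at hv
          exact (Option.some_inj.mp hv).symm
        · rw [PySem.Dict.get?_insert_of_ne _ _ hk] at hv
          exact hmemo k v hv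
      have h5 := ih (pre ++ [c]) rest (memo.insert c (dealStep K c))
        (out ++ [PySem.Int.toStr (dealStep K c)]) ((pre.length : Int) + 1) (by simp) hmemo'
      rw [show pre ++ [c] ++ cs ++ rest = pre ++ (c :: cs) ++ rest by simp] at h5
      rw [show ((pre.length : Int) + 1) + (cs.length : Int)
            = (pre.length : Int) + ((c :: cs).length : Int) by simp; try omega] at h5
      rw [h5]
      simp

-- ===== VERDICT (by name: the statement is the Claim_ definition above) =====
theorem solve_spec : Claim_equal_solve := by
  intro par _ hpre
  obtain ⟨K, n, queries⟩ := par
  have hpre' : n ≤ (queries.length : Int) := hpre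
  have hnt : n.toNat ≤ queries.length := by omega
  show solve (K, n, queries) = solve_alt (K, n, queries)
  simp only [solve, solve_alt]
  rw [PySem.List.foldl_append_singleton_eq_map, List.nil_append]
  have hlt : ((queries.take n.toNat).length : Int) = (n.toNat : Int) := by
    rw [List.length_take]; omega
  have hrangeB : PySem.List.pyRange 0 n 1
      = PySem.List.pyRange 0 (0 + ((queries.take n.toNat).length : Int)) 1 := by
    by_cases hn : 0 ≤ n
    · rw [hlt]; congr 1; omega
    · rw [PySem.List.pyRange_one_eq_nil (by omega),
        PySem.List.pyRange_one_eq_nil (by rw [hlt]; omega)]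
  have hB := memo_fold K (queries.take n.toNat) [] (queries.drop n.toNat)
    PySem.Dict.empty [] 0 (by simp)
    (fun k v hv => absurd (hv ▸ PySem.Dict.get?_empty k) (by simp))
  rw [List.nil_append, List.take_append_drop, List.nil_append] at hB
  rw [hrangeB, hB]
  by_cases hK : 0 ≤ K
  · -- K ≥ 0: run A's loop
    have hlc : ((queries.take n.toNat).map (fun q => ((q, (-1 : Int)) : Int × Int))).length = n.toNat := by
      simp; omega
    have f1 : PySem.List.pyRepeat [(-1 : Int)] n
        = ((queries.take n.toNat).map (fun q => ((q, (-1 : Int)) : Int × Int))).map Prod.snd := by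
      rw [PySem.List.pyRepeat_singleton, List.map_map]
      have hc : (Prod.snd ∘ fun q => ((q, (-1 : Int)) : Int × Int)) = fun _ => (-1 : Int) := rfl
      rw [hc, List.map_const', List.length_take]
      congr 1
      omega
    have f2 : ((queries.take n.toNat).map (fun q => ((q, (-1 : Int)) : Int × Int))).map Prod.fst
        ++ queries.drop n.toNat = queries := by
      rw [List.map_map]
      have hc : (Prod.fst ∘ fun q => ((q, (-1 : Int)) : Int × Int)) = id := rfl
      rw [hc, List.map_id, List.take_append_drop]
    have hrange : PySem.List.pyRange 0 n 1
        = PySem.List.pyRange 0 (((queries.take n.toNat).map (fun q => ((q, (-1 : Int)) : Int × Int))).length : Int) 1 := by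
      by_cases hn : 0 ≤ n
      · rw [hlc]; congr 1; omega
      · rw [PySem.List.pyRange_one_eq_nil (by omega), PySem.List.pyRange_one_eq_nil (by rw [hlc]; omega)]
    have hinit : (PySem.List.pyRepeat [(-1 : Int)] n, queries, (0 : Int))
        = (((queries.take n.toNat).map (fun q => ((q, (-1 : Int)) : Int × Int))).map Prod.snd,
           ((queries.take n.toNat).map (fun q => ((q, (-1 : Int)) : Int × Int))).map Prod.fst
             ++ queries.drop n.toNat, (0 : Int)) := by
      rw [f1, f2]
    rw [hinit]
    rw [outerA K n K.toNat 1 (K + 1) 0 _ (queries.drop n.toNat) (by omega) hrange]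
    rw [runA_fst]
    congr 1
    rw [List.map_map, List.map_map, List.map_map]
    apply List.map_congr_left
    intro q _
    simp only [Function.comp_apply]
    exact congrArg PySem.Int.toStr (runCard_eq_dealStep K q hK)
  · -- K < 0: A's loop is empty and no card is ever dealt
    rw [PySem.List.pyRange_one_eq_nil (show K + 1 ≤ 1 by omega), List.foldl_nil]
    congr 1
    rw [PySem.List.pyRepeat_singleton, List.map_replicate]
    have hg : ∀ q, PySem.Int.toStr (dealStep K q) = PySem.Int.toStr (-1) := by
      intro q
      unfold dealStep
      rw [if_pos (by omega)]
    rw [List.map_congr_left (fun q _ => hg q), List.map_const', List.length_take]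
    congr 1
    omega
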